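-- pv_equiv track=rewrite | github.com/frserras/domain-discernibility | vectorizer.py | simple_dict
-- ===== SOURCE A (Python) =====
-- def simple_dict(docs):
--     d = dict()
--     idx = 0
--     for doc in docs:
--         for word in doc:
--             if not word in d:
--                 d[word] = idx
--                 idx += 1
--     return d
-- ===== SOURCE B (Python) =====
-- def simple_dict(docs):
--     flat = [w for doc in docs for w in doc]
--     first = {}
--     for pos, w in reversed(list(enumerate(flat))):
--         first[w] = pos  # walking backwards, the last write for w is its FIRST occurrence
--     order = sorted(first, key=lambda w: first[w])
--     return {w: i for i, w in enumerate(order)}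
-- ===== Notes on version B (the rewrite author's own statement) =====
-- stated objective: alternative
-- what changed: Instead of A's single forward pass inserting unseen words with a running counter, B computes each word's first-occurrence position by an unconditional reverse overwrite pass (no membership test), then SORTS the unique words by that position and numbers the sorted list.
import Mathlib
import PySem

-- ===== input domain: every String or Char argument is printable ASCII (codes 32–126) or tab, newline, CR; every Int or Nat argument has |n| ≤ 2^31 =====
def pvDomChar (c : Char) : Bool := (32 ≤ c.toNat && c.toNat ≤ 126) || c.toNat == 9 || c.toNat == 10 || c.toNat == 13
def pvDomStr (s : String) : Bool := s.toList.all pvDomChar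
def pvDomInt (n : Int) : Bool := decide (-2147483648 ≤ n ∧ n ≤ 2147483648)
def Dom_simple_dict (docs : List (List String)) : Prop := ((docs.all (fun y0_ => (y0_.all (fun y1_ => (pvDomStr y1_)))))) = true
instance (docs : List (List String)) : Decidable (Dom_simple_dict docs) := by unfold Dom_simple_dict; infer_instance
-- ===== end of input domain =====

-- B replaces A's insert-if-new forward pass with a different algorithm: an unconditional
-- reverse overwrite pass recording each word's first-occurrence position, then a SORT of the
-- unique words by that position; a genuinely different strategy of similar size ("alternative").

-- ===== PORT A =====
-- one word step of A's inner loop: `if not word in d: d[word] = idx; idx += 1`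
def simpleDictStep (st : PySem.Dict String Int × Int) (word : String) : PySem.Dict String Int × Int :=
  if !(st.1.contains word) then (st.1.insert word st.2, st.2 + 1) else st

def simple_dict (docs : List (List String)) : List (String × Int) :=
  (docs.foldl (fun st doc => doc.foldl simpleDictStep st) (PySem.Dict.empty, 0)).1.items

-- ===== PORT B =====
-- first = {}; for pos, w in reversed(list(enumerate(flat))): first[w] = pos
def simpleDictFirst (flat : List String) : PySem.Dict String Int :=
  (PySem.List.enumerate flat 0).reverse.foldl (fun d p => d.insert p.2 p.1) PySem.Dict.empty

-- order = sorted(first, key=lambda w: first[w])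
def simpleDictOrder (flat : List String) : List String :=
  PySem.List.sorted (simpleDictFirst flat).keys (fun w => (simpleDictFirst flat).getD w 0) false

def simple_dict_alt (docs : List (List String)) : List (String × Int) :=
  -- flat = [w for doc in docs for w in doc];  return {w: i for i, w in enumerate(order)}
  (PySem.List.enumerate (simpleDictOrder (docs.flatMap (fun doc => doc))) 0).map
    (fun p => (p.2, p.1))

-- ===== PRECONDITION & SPEC =====
def Spec_simple_dict (docs : List (List String)) (out : List (String × Int)) : Prop := out = simple_dict_alt docs
instance (docs : List (List String)) (out : List (String × Int)) : Decidable (Spec_simple_dict docs out) := by unfold Spec_simple_dict; infer_instance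

-- ===== CLAIM (what is proved, stated in full; the proofs are below) =====
def Claim_equal_simple_dict : Prop := ∀ (docs : List (List String)), Dom_simple_dict docs → Spec_simple_dict docs (simple_dict docs)

-- ===== LEMMAS AND PROOFS =====

-- ---- A side: the insert-if-new loop produces the first-occurrence dedup, numbered 0,1,… ----

-- loop invariant of A: the dict's items are its keys numbered 0,1,… and idx is the key count;
-- running the word loop extends the keys by Set.update.
theorem simple_dict_loop (ws : List String) (d : PySem.Dict String Int) (n : Int)
    (hitems : d.items = (PySem.List.enumerate d.keys 0).map (fun p => (p.2, p.1)))
    (hn : n = d.keys.length) :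
    (ws.foldl simpleDictStep (d, n)).1.items
        = (PySem.List.enumerate (PySem.Set.update d.keys ws) 0).map (fun p => (p.2, p.1))
      ∧ (ws.foldl simpleDictStep (d, n)).2
        = ((PySem.Set.update d.keys ws).length : Int) := by
  induction ws generalizing d n with
  | nil =>
      simp [PySem.Set.update_nil, hitems, hn]
  | cons w ws ih =>
      rw [PySem.Set.update_cons]
      by_cases hc : d.contains w = true
      · have hmem : w ∈ d.keys := (PySem.Dict.contains_iff_mem_keys d w).mp hc
        have : (w :: ws).foldl simpleDictStep (d, n) = ws.foldl simpleDictStep (d, n) := by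
          simp [List.foldl_cons, simpleDictStep, hc]
        rw [this, PySem.Set.add_of_mem hmem]
        exact ih d n hitems hn
      · have hc' : d.contains w = false := by simpa using hc
        have hmem : w ∉ d.keys := fun h => hc ((PySem.Dict.contains_iff_mem_keys d w).mpr h)
        have hstep : (w :: ws).foldl simpleDictStep (d, n)
            = ws.foldl simpleDictStep (d.insert w n, n + 1) := by
          simp [List.foldl_cons, simpleDictStep, hc']
        rw [hstep, PySem.Set.add_of_not_mem hmem]
        have hkeys : (d.insert w n).keys = d.keys ++ [w] :=
          PySem.Dict.keys_insert_of_not_contains d n hc'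
        rw [← hkeys]
        refine ih (d.insert w n) (n + 1) ?_ ?_
        · rw [PySem.Dict.items_insert_of_not_contains d n hc', hkeys,
              PySem.List.enumerate_append, List.map_append, hitems, hn]
          simp [PySem.List.enumerate_cons, PySem.List.enumerate_nil]
        · rw [hkeys, hn]
          simp

-- A's nested loop over docs is the word loop over the flattened word list
theorem simple_dict_eq_flat (docs : List (List String)) :
    simple_dict docs
      = (docs.flatten.foldl simpleDictStep (PySem.Dict.empty, 0)).1.items := by
  unfold simple_dict
  rw [List.foldl_flatten]

-- A returns the first-occurrence dedup of the flattened word list, numbered 0,1,…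
theorem simple_dict_eq_dedup (docs : List (List String)) :
    simple_dict docs
      = (PySem.List.enumerate (PySem.Set.ofList docs.flatten) 0).map (fun p => (p.2, p.1)) := by
  rw [simple_dict_eq_flat]
  have h := simple_dict_loop docs.flatten PySem.Dict.empty 0 (by rfl) (by rfl)
  rw [h.1]
  have hkeys : (PySem.Dict.empty : PySem.Dict String Int).keys = [] := by rfl
  rw [hkeys, PySem.Set.update_nil_left]

-- ---- B side ----

-- the reverse overwrite pass, read off: the dict maps w to s + (first index of w)
theorem get?_revfold (xs : List String) (s : Int) (w : String) :
    ((PySem.List.enumerate xs s).foldr (fun p d => d.insert p.2 p.1)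
        (PySem.Dict.empty : PySem.Dict String Int)).get? w
      = (PySem.List.index? xs w).map (fun k => s + (k : Int)) := by
  induction xs generalizing s with
  | nil => simp [PySem.List.enumerate_nil, PySem.List.index?_eq_idxOf?]
  | cons x xs ih =>
      rw [PySem.List.enumerate_cons, List.foldr_cons]
      by_cases hwx : w = x
      · subst hwx
        rw [PySem.Dict.get?_insert_self, PySem.List.index?_cons_self]
        simp
      · rw [PySem.Dict.get?_insert_of_ne _ _ hwx, ih (s + 1),
            PySem.List.index?_cons_of_ne _ (fun h => hwx h.symm)]
        cases h : PySem.List.index? xs w with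
        | none => simp
        | some k => simp; ring

-- first-occurrence indices are strictly increasing along the first-occurrence dedup
theorem pairwise_idxOf_ofList (xs : List String) :
    (PySem.Set.ofList xs).Pairwise (fun a b => xs.idxOf a < xs.idxOf b) := by
  induction xs with
  | nil => simp [PySem.Set.ofList_nil]
  | cons x xs ih =>
      rw [PySem.Set.ofList_cons]
      constructor
      · intro b hb
        have hbx : b ≠ x := ((PySem.Set.mem_discard _ _ _).mp hb).2
        simp [hbx.symm]
      · have hsub : (PySem.Set.discard (PySem.Set.ofList xs) x).Sublist (PySem.Set.ofList xs) := by
          simp [PySem.Set.discard]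
        have hp : (PySem.Set.discard (PySem.Set.ofList xs) x).Pairwise
            (fun a b => xs.idxOf a < xs.idxOf b) := ih.sublist hsub
        refine hp.imp_of_mem ?_
        intro a b ha hb h
        have hax : a ≠ x := ((PySem.Set.mem_discard _ _ _).mp ha).2
        have hbx : b ≠ x := ((PySem.Set.mem_discard _ _ _).mp hb).2
        simp [hax.symm, hbx.symm]
        omega

-- idxOf? agrees with idxOf on members (general list fact)
theorem idxOf?_of_mem {α : Type} [BEq α] [LawfulBEq α] {xs : List α} {w : α} (h : w ∈ xs) :
    xs.idxOf? w = some (xs.idxOf w) := by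
  induction xs with
  | nil => cases h
  | cons x xs ih =>
      by_cases hwx : w = x
      · subst hwx; simp [List.idxOf?_cons]
      · have hx : (x == w) = false := by simp [Ne.symm hwx]
        have hmem : w ∈ xs := by cases h with | head => exact absurd rfl hwx | tail _ h => exact h
        simp [List.idxOf?_cons, List.idxOf_cons, hx, ih hmem]

-- the reverse overwrite pass, read off as a whole dict
theorem get?_simpleDictFirst (flat : List String) (w : String) :
    (simpleDictFirst flat).get? w
      = (PySem.List.index? flat w).map (fun k => (0 : Int) + (k : Int)) := by
  rw [simpleDictFirst, List.foldl_reverse]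
  exact get?_revfold flat 0 w

-- the sort by first-occurrence position reproduces the first-occurrence dedup
theorem simpleDictOrder_eq_ofList (flat : List String) :
    simpleDictOrder flat = PySem.Set.ofList flat := by
  have hkeys : (simpleDictFirst flat).keys = PySem.Set.ofList flat.reverse := by
    rw [simpleDictFirst,
        PySem.Dict.keys_foldl_insert_key (l := (PySem.List.enumerate flat 0).reverse)
          (key := fun p => p.2) (f := fun d p => p.1) (d := PySem.Dict.empty),
        PySem.Dict.keys_empty, PySem.Set.update_nil_left, List.map_reverse,
        PySem.List.map_snd_enumerate]
  have hkey : ∀ w ∈ flat, (simpleDictFirst flat).getD w 0 = (flat.idxOf w : Int) := by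
    intro w hw
    rw [PySem.Dict.getD_eq_get?_getD, get?_simpleDictFirst, PySem.List.index?_eq_idxOf?,
        idxOf?_of_mem hw]
    simp
  rw [simpleDictOrder]
  apply PySem.List.sorted_eq_of_perm_of_pairwise_lt
  · rw [hkeys, List.perm_ext_iff_of_nodup (PySem.Set.nodup_ofList _) (PySem.Set.nodup_ofList _)]
    intro a
    rw [PySem.Set.mem_ofList, PySem.Set.mem_ofList, List.mem_reverse]
  · refine (pairwise_idxOf_ofList flat).imp_of_mem ?_
    intro a b ha hb h
    have ha' : a ∈ flat := (PySem.Set.mem_ofList _ _).mp ha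
    have hb' : b ∈ flat := (PySem.Set.mem_ofList _ _).mp hb
    rw [hkey a ha', hkey b hb']
    exact_mod_cast h

theorem simple_dict_alt_eq_dedup (docs : List (List String)) :
    simple_dict_alt docs
      = (PySem.List.enumerate (PySem.Set.ofList docs.flatten) 0).map (fun p => (p.2, p.1)) := by
  have hflat : docs.flatMap (fun doc => doc) = docs.flatten := by
    simp [List.flatMap_def]
  rw [simple_dict_alt, hflat, simpleDictOrder_eq_ofList]

-- ===== VERDICT (by name: the statement is the Claim_ definition above) =====
theorem simple_dict_spec : Claim_equal_simple_dict := by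
  intro docs _
  unfold Spec_simple_dict
  rw [simple_dict_eq_dedup, simple_dict_alt_eq_dedup]
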